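-- pv_equiv track=rewrite | github.com/patmakesapps/LumaKit | core/summarizer.py | _get_older_messages
-- ===== SOURCE A (Python) =====
-- RECENT_TURNS = 10  # keep this many recent turns verbatim
--
-- def _split_point(messages: list[dict]) -> int:
--     """Find the index where recent messages start.
--
--     We want to keep the last RECENT_TURNS user/assistant exchanges,
--     plus any tool messages attached to them.
--     """
--     # Walk backward, counting user+assistant turns
--     turn_count = 0
--     split = len(messages)
--
--     for i in range(len(messages) - 1, 0, -1):
--         role = messages[i].get("role")
--         if role in ("user", "assistant"):
--             turn_count += 1
--             if turn_count >= RECENT_TURNS * 2:  # user + assistant = 2 messages per turn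
--                 split = i
--                 break
--
--     return split
--
-- def _get_older_messages(messages: list[dict]) -> list[dict]:
--     """Get messages that will be summarized (everything before the recent window)."""
--     split = _split_point(messages)
--     # Skip system messages at the start
--     start = 0
--     for i, msg in enumerate(messages):
--         if msg.get("role") != "system":
--             start = i
--             break
--     return messages[start:split]
-- ===== SOURCE B (Python) =====
-- RECENT_TURNS = 10  # keep this many recent turns verbatim
--
--
-- def _get_older_messages(messages):
--     """Get messages that will be summarized (everything before the recent window)."""
--     # One forward pass collecting qualifying indices (index 0 is never counted,
--     # matching the backward walk that stops before index 0).
--     idxs = [i for i in range(1, len(messages))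
--             if messages[i].get("role") in ("user", "assistant")]
--     split = idxs[-RECENT_TURNS * 2] if len(idxs) >= RECENT_TURNS * 2 else len(messages)
--     start = next((i for i, m in enumerate(messages) if m.get("role") != "system"), 0)
--     return messages[start:split]
-- ===== Notes on version B (the rewrite author's own statement) =====
-- stated objective: alternative
-- what changed: Replaces A's backward counting loop with break by a single forward index comprehension plus a negative index idxs[-20], and the start-scan loop by next() over a generator.
import Mathlib
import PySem

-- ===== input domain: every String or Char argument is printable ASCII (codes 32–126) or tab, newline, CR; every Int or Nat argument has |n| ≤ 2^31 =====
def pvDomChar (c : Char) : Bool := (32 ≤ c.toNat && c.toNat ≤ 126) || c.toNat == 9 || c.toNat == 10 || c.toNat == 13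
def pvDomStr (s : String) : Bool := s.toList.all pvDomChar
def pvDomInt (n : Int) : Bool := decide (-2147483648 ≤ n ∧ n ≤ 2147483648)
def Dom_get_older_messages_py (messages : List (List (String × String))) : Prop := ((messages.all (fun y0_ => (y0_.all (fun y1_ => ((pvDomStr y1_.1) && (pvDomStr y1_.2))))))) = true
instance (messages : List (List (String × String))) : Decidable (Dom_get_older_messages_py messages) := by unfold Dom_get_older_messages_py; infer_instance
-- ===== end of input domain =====

-- B replaces A's backward counting loop with a single forward index-comprehension
-- plus a negative index (alternative decomposition, same cost).

-- ===== PORT A =====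
-- the backward for-loop of _split_point, with break
def pvSplitLoopA (messages : List (List (String × String))) : List Int → Int → Int → Int
  | [], _, split => split
  | i :: rest, tc, split =>
    let role := ((PySem.List.pyGet? messages i).getD []).lookup "role"
    if role == some "user" || role == some "assistant" then
      if tc + 1 ≥ 20 then i
      else pvSplitLoopA messages rest (tc + 1) split
    else pvSplitLoopA messages rest tc split

def pvSplitPointA (messages : List (List (String × String))) : Int :=
  pvSplitLoopA messages (PySem.List.pyRange ((messages.length : Int) - 1) 0 (-1)) 0 (messages.length : Int)

-- the enumerate loop of _get_older_messages, with break (start defaults to 0)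
def pvStartLoopA : List (Int × List (String × String)) → Int
  | [] => 0
  | (i, msg) :: rest =>
    if (msg.lookup "role") != some "system" then i else pvStartLoopA rest

def get_older_messages_py (messages : List (List (String × String))) : List (List (String × String)) :=
  let split := pvSplitPointA messages
  let start := pvStartLoopA (PySem.List.enumerate messages)
  PySem.List.slice messages (some start) (some split)

-- ===== PORT B =====
def pvQual (messages : List (List (String × String))) (i : Int) : Bool :=
  let r := ((PySem.List.pyGet? messages i).getD []).lookup "role"
  r == some "user" || r == some "assistant"

def get_older_messages_py_alt (messages : List (List (String × String))) : List (List (String × String)) :=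
  let n : Int := messages.length
  let idxs := (PySem.List.pyRange 1 n 1).filter (pvQual messages)
  let split := if idxs.length ≥ 20 then (PySem.List.pyGet? idxs (-20)).getD 0 else n
  let start := (((PySem.List.enumerate messages).find?
      (fun p => (p.2.lookup "role") != some "system")).map (fun p => p.1)).getD 0
  PySem.List.slice messages (some start) (some split)

-- ===== PRECONDITION & SPEC =====
def Spec_get_older_messages_py (messages : List (List (String × String))) (out : List (List (String × String))) : Prop := out = get_older_messages_py_alt messages
instance (messages : List (List (String × String))) (out : List (List (String × String))) : Decidable (Spec_get_older_messages_py messages out) := by unfold Spec_get_older_messages_py; infer_instance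

-- ===== CLAIM (what is proved, stated in full; the proofs are below) =====
def Claim_equal_get_older_messages_py : Prop := ∀ (messages : List (List (String × String))), Dom_get_older_messages_py messages → Spec_get_older_messages_py messages (get_older_messages_py messages)

-- ===== LEMMAS AND PROOFS =====

-- The start index: A's break-loop equals B's find?.
theorem pvStart_eq (l : List (Int × List (String × String))) :
    pvStartLoopA l =
      ((l.find? (fun p => (p.2.lookup "role") != some "system")).map
        (fun p => p.1)).getD 0 := by
  induction l with
  | nil => rfl
  | cons h t ih =>
    obtain ⟨i, msg⟩ := h
    by_cases hc : ((msg.lookup "role") != some "system") = true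
    · simp [pvStartLoopA, List.find?, hc]
    · simp at hc
      simp [pvStartLoopA, List.find?, hc, ih]

-- The backward counting loop, characterised by the filtered list.
theorem pvSplitLoop_eq (messages : List (List (String × String))) :
    ∀ (l : List Int) (tc split : Int), 0 ≤ tc → tc < 20 →
      pvSplitLoopA messages l tc split =
        ((l.filter (pvQual messages))[(19 - tc.toNat)]?).getD split := by
  intro l
  induction l with
  | nil => intro tc split _ _; simp [pvSplitLoopA]
  | cons i rest ih =>
    intro tc split h0 h20
    by_cases hq : pvQual messages i = true
    · have hq' : (((PySem.List.pyGet? messages i).getD []).lookup "role" == some "user"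
          || ((PySem.List.pyGet? messages i).getD []).lookup "role" == some "assistant") = true := hq
      by_cases hb : tc + 1 ≥ 20
      · have htc : tc.toNat = 19 := by omega
        simp [pvSplitLoopA, hq', hb, hq, htc]
      · have h1 : (19 - tc.toNat) = (19 - (tc + 1).toNat) + 1 := by omega
        simp only [pvSplitLoopA, hq', if_true, hb, if_false]
        rw [ih (tc + 1) split (by omega) (by omega)]
        simp [hq, h1]
    · have hq' : ¬ ((((PySem.List.pyGet? messages i).getD []).lookup "role" == some "user"
          || ((PySem.List.pyGet? messages i).getD []).lookup "role" == some "assistant") = true) := hq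
      simp only [pvSplitLoopA, hq']
      rw [ih tc split h0 h20]
      simp [hq]

-- ===== VERDICT (by name: the statement is the Claim_ definition above) =====
theorem get_older_messages_py_spec : Claim_equal_get_older_messages_py := by
  intro messages _
  unfold Spec_get_older_messages_py get_older_messages_py get_older_messages_py_alt
  simp only
  rw [pvStart_eq]
  congr 2
  -- split points agree
  unfold pvSplitPointA
  rw [pvSplitLoop_eq messages _ 0 _ (by omega) (by omega)]
  have hrange : PySem.List.pyRange ((messages.length : Int) - 1) 0 (-1)
      = (PySem.List.pyRange 1 (messages.length : Int) 1).reverse := by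
    rw [PySem.List.pyRange_neg_one_eq_reverse]
    norm_num
  rw [hrange, List.filter_reverse]
  set idxs := (PySem.List.pyRange 1 (messages.length : Int) 1).filter (pvQual messages) with hidxs
  by_cases hlen : idxs.length ≥ 20
  · rw [PySem.List.pyGet?_neg_ofNat idxs 20 (by omega) (by omega)]
    have h19 : 19 < idxs.length := by omega
    have hi : idxs.length - 20 < idxs.length := by omega
    simp only [Int.toNat_zero, Nat.sub_zero]
    rw [List.getElem?_reverse h19]
    have : idxs.length - 1 - 19 = idxs.length - 20 := by omega
    rw [this]
    simp [if_pos hlen, List.getElem?_eq_getElem hi]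
  · have : idxs.reverse[(19 : Nat)]? = none := by
      rw [List.getElem?_eq_none_iff]; simp; omega
    simp [this, if_neg hlen]
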